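-- pv_equiv track=rewrite | github.com/mlevitan96-crypto/trading-bot | src/kill_switch_recovery_orchestrator.py | _latest_ts
-- ===== SOURCE A (Python) =====
-- from typing import Dict, Any, List, Tuple
--
-- def _latest_ts(rows: List[Dict[str,Any]], keys=("ts","timestamp")) -> int:
--     for r in reversed(rows):
--         for k in keys:
--             val = r.get(k)
--             if val is not None:
--                 try: return int(val)
--                 except: continue
--     return 0
-- ===== SOURCE B (Python) =====
-- def _latest_ts(rows, keys=("ts","timestamp")):
--     result = 0
--     for r in rows:
--         for k in keys:
--             val = r.get(k)
--             if val is not None: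
--                 try:
--                     result = int(val)
--                     break
--                 except:
--                     continue
--     return result
-- ===== Notes on version B (the rewrite author's own statement) =====
-- stated objective: alternative
-- what changed: Replaces the reversed early-return scan with a single forward pass that keeps a running accumulator updated to each row's first convertible value, returning the last one kept.
import Mathlib
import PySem

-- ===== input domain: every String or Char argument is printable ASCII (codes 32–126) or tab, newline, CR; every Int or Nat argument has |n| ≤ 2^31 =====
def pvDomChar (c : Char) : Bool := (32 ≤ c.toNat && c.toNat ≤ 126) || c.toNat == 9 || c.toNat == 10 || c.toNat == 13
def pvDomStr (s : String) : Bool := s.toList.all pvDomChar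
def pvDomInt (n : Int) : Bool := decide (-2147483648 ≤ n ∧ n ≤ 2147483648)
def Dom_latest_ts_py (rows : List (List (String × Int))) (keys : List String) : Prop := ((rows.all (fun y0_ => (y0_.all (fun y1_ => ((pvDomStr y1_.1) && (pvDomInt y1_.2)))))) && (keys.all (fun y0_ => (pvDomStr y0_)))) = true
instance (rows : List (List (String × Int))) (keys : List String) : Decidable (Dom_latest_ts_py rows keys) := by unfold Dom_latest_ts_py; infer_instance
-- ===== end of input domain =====

-- B replaces A's reversed early-return scan by a forward accumulator pass; same cost (objective: alternative).
-- Values are Int here, so Python's int(val) is the identity and its bare-except branch is unreachable on this domain.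

-- ===== PORT A =====
-- inner 'for k in keys: val = r.get(k); if val is not None: return int(val)'
def latestTsRowA (r : List (String × Int)) (keys : List String) : Option Int :=
  match keys with
  | [] => none
  | k :: ks =>
    match (PySem.Dict.mk r).get? k with
    | some v => some v          -- int(val) on an int returns it; except-branch unreachable
    | none => latestTsRowA r ks

-- 'for r in reversed(rows): … return 0'
def latestTsRevA (rs : List (List (String × Int))) (keys : List String) : Int :=
  match rs with
  | [] => 0
  | r :: rest =>
    match latestTsRowA r keys with
    | some v => v
    | none => latestTsRevA rest keys

def latest_ts_py (rows : List (List (String × Int))) (keys : List String) : Int :=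
  latestTsRevA rows.reverse keys

-- ===== PORT B =====
-- inner key scan: first present key's value (break on success), or none
def latestTsRowB (r : List (String × Int)) (keys : List String) : Option Int :=
  match keys with
  | [] => none
  | k :: ks =>
    match (PySem.Dict.mk r).get? k with
    | some v => some v
    | none => latestTsRowB r ks

-- forward fold: 'result = 0; for r in rows: …; return result'
def latest_ts_py_alt (rows : List (List (String × Int))) (keys : List String) : Int :=
  rows.foldl (fun result r =>
    match latestTsRowB r keys with
    | some v => v
    | none => result) 0

-- ===== PRECONDITION & SPEC =====
def Spec_latest_ts_py (rows : List (List (String × Int))) (keys : List String) (out : Int) : Prop := out = latest_ts_py_alt rows keys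
instance (rows : List (List (String × Int))) (keys : List String) (out : Int) : Decidable (Spec_latest_ts_py rows keys out) := by unfold Spec_latest_ts_py; infer_instance

-- ===== CLAIM (what is proved, stated in full; the proofs are below) =====
def Claim_equal_latest_ts_py : Prop := ∀ (rows : List (List (String × Int))) (keys : List String), Dom_latest_ts_py rows keys → Spec_latest_ts_py rows keys (latest_ts_py rows keys)

-- ===== LEMMAS AND PROOFS =====

theorem latestTsRow_eq (r : List (String × Int)) (keys : List String) :
    latestTsRowB r keys = latestTsRowA r keys := by
  induction keys with
  | nil => rfl
  | cons k ks ih => simp [latestTsRowA, latestTsRowB, ih]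

-- generalized accumulator version of A's reversed scan
def latestTsRevAcc (rs : List (List (String × Int))) (keys : List String) (acc : Int) : Int :=
  match rs with
  | [] => acc
  | r :: rest =>
    match latestTsRowA r keys with
    | some v => v
    | none => latestTsRevAcc rest keys acc

theorem latestTsRevAcc_zero (rs : List (List (String × Int))) (keys : List String) :
    latestTsRevAcc rs keys 0 = latestTsRevA rs keys := by
  induction rs with
  | nil => rfl
  | cons r rest ih =>
    simp only [latestTsRevAcc, latestTsRevA, ih]

theorem latestTsRevAcc_append_single (xs : List (List (String × Int))) (r : List (String × Int))
    (keys : List String) (acc : Int) :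
    latestTsRevAcc (xs ++ [r]) keys acc
      = latestTsRevAcc xs keys (match latestTsRowA r keys with | some v => v | none => acc) := by
  induction xs with
  | nil => simp [latestTsRevAcc]
  | cons x xs ih =>
    simp only [List.cons_append, latestTsRevAcc, ih]

theorem foldl_eq_revAcc (rows : List (List (String × Int))) (keys : List String) (acc : Int) :
    rows.foldl (fun result r =>
      match latestTsRowB r keys with
      | some v => v
      | none => result) acc
    = latestTsRevAcc rows.reverse keys acc := by
  induction rows generalizing acc with
  | nil => rfl
  | cons r rest ih =>
    rw [List.foldl_cons, ih, List.reverse_cons, latestTsRevAcc_append_single,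
      latestTsRow_eq]

-- ===== VERDICT (by name: the statement is the Claim_ definition above) =====
theorem latest_ts_py_spec : Claim_equal_latest_ts_py := by
  intro rows keys _
  unfold Spec_latest_ts_py latest_ts_py latest_ts_py_alt
  rw [foldl_eq_revAcc, latestTsRevAcc_zero]
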